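-- pv_equiv track=rewrite | github.com/Gallinaryoso/CS143ProjectFamSquad | shortestPath.py | findMinimumPath
-- ===== SOURCE A (Python) =====
-- def findMinimumPath(paths):
--   minPath = paths[0]
--   minWeight = minPath[0]
--
--   for path in paths:
--
--     if(path[0] < minWeight):
--       minWeight = path[0]
--       minPath = path
--
--     # If the paths have the same weight, we favor the one with the smaller
--     # length.
--     elif(path[0] == minWeight):
--       if(len(path) < len(minPath)):
--         minPath = path
--
--   return minPath
-- ===== SOURCE B (Python) =====
-- def findMinimumPath(paths):
--   return sorted(paths, key=lambda p: (p[0], len(p)))[0]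
-- ===== Notes on version B (the rewrite author's own statement) =====
-- stated objective: simpler
-- what changed: Replaced the manual min-tracking loop (separate weight/path variables and three branches) by a one-line stable sort on the key (weight, length) followed by taking the first element; Python's stable sort reproduces A's strict-< tie-breaking (first of equal keys wins).
import Mathlib
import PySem

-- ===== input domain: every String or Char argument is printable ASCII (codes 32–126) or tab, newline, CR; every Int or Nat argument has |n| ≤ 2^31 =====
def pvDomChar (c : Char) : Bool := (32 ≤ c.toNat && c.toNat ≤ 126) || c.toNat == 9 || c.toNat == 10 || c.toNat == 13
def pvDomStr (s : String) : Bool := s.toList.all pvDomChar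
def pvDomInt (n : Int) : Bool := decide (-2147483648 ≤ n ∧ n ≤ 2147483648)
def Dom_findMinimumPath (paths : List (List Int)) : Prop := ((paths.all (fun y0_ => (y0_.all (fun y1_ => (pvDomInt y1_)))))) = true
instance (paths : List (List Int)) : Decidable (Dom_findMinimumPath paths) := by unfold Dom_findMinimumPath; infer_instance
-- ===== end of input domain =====

-- B replaces A's manual min-tracking loop by a stable sort on the key (weight, length) and takes the first element (simpler, not faster).

-- ===== PORT A =====
-- the loop body of A: state = (minWeight, minPath); path[0] ported totally via pyGetD (Pre_ excludes the raising inputs)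
def pvStepA (st : Int × List Int) (path : List Int) : Int × List Int :=
  let w := PySem.List.pyGetD path 0 0
  if w < st.1 then (w, path)
  else if w = st.1 then
    (if path.length < st.2.length then (st.1, path) else st)
  else st

def findMinimumPath (paths : List (List Int)) : List Int :=
  let minPath := PySem.List.pyGetD paths 0 []     -- paths[0]
  let minWeight := PySem.List.pyGetD minPath 0 0  -- minPath[0]
  (paths.foldl pvStepA (minWeight, minPath)).2

-- ===== PORT B =====
def findMinimumPath_alt (paths : List (List Int)) : List Int :=
  PySem.List.pyGetD
    (PySem.List.sorted2 paths (fun p => PySem.List.pyGetD p 0 0) (fun p => (p.length : Int)))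
    0 []   -- sorted(paths, key=lambda p: (p[0], len(p)))[0]

-- ===== PRECONDITION & SPEC =====
-- Pre_ excludes exactly the inputs on which A raises IndexError: empty paths (paths[0]) or an empty inner path (path[0]).
def Pre_findMinimumPath (paths : List (List Int)) : Prop :=
  paths ≠ [] ∧ ∀ p ∈ paths, p ≠ []
instance (paths : List (List Int)) : Decidable (Pre_findMinimumPath paths) := by unfold Pre_findMinimumPath; infer_instance

def pvWitness_findMinimumPath : List (List Int) := [[2, 7], [1, 3, 4], [1, 5]]

def Spec_findMinimumPath (paths : List (List Int)) (out : List Int) : Prop := out = findMinimumPath_alt paths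
instance (paths : List (List Int)) (out : List Int) : Decidable (Spec_findMinimumPath paths out) := by unfold Spec_findMinimumPath; infer_instance

-- ===== CLAIM (what is proved, stated in full; the proofs are below) =====
def Claim_equal_findMinimumPath : Prop := ∀ (paths : List (List Int)), Dom_findMinimumPath paths → Pre_findMinimumPath paths → Spec_findMinimumPath paths (findMinimumPath paths)

-- ===== LEMMAS AND PROOFS =====

-- the comparison sorted2 uses (strict lexicographic on (weight, length))
def pvBefore (p m : List Int) : Bool :=
  decide (PySem.List.pyGetD p 0 0 < PySem.List.pyGetD m 0 0) ||
  (!decide (PySem.List.pyGetD m 0 0 < PySem.List.pyGetD p 0 0) &&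
   decide ((p.length : Int) < (m.length : Int)))

-- the "first minimum" scan both sides reduce to
def pvScan (t : List (List Int)) (a : List Int) : List Int :=
  t.foldl (fun m p => if pvBefore p m then p else m) a

lemma pvGetD_zero {α : Type} (l : List α) (d : α) :
    PySem.List.pyGetD l 0 d = l.headD d := by
  cases l <;> simp [PySem.List.pyGetD, PySem.List.pyGet?, PySem.List.pyIdx?]

lemma pv_insertBy_nil (bef : List Int → List Int → Bool) (x : List Int) :
    PySem.List.insertBy bef x [] = [x] := by
  simp [PySem.List.insertBy]

lemma pv_insertBy_cons (bef : List Int → List Int → Bool) (x a : List Int) (acc : List (List Int)) :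
    PySem.List.insertBy bef x (a :: acc) =
      if bef x a then x :: a :: acc else a :: PySem.List.insertBy bef x acc := by
  simp [PySem.List.insertBy]

lemma pv_foldl_insertBy_headD (bef : List Int → List Int → Bool)
    (t : List (List Int)) (a : List Int) (acc : List (List Int)) (d : List Int) :
    (t.foldl (fun ac x => PySem.List.insertBy bef x ac) (a :: acc)).headD d
      = t.foldl (fun m p => if bef p m then p else m) a := by
  induction t generalizing a acc with
  | nil => simp
  | cons x t ih =>
    simp only [List.foldl_cons, pv_insertBy_cons]
    split_ifs with h
    · rw [ih]
    · exact ih a _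

lemma pvK1_step (l : List (List Int)) (m : List Int) :
    (l.foldl pvStepA (PySem.List.pyGetD m 0 0, m)).2 = pvScan l m := by
  induction l generalizing m with
  | nil => simp [pvScan]
  | cons p t ih =>
    simp only [List.foldl_cons, pvScan]
    have hstep : pvStepA (PySem.List.pyGetD m 0 0, m) p =
        (PySem.List.pyGetD (if pvBefore p m then p else m) 0 0, if pvBefore p m then p else m) := by
      simp only [pvStepA, pvBefore]
      split_ifs with h1 h2 h3 <;> simp_all <;> omega
    rw [hstep]
    split_ifs with h <;> [exact ih p; exact ih m]

lemma pv_total_eq (paths : List (List Int)) :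
    findMinimumPath paths = findMinimumPath_alt paths := by
  cases paths with
  | nil => decide
  | cons x t =>
    have hA : findMinimumPath (x :: t) = pvScan t x := by
      show ((x :: t).foldl pvStepA
        (PySem.List.pyGetD (PySem.List.pyGetD (x :: t) 0 []) 0 0,
         PySem.List.pyGetD (x :: t) 0 [])).2 = pvScan t x
      rw [pvGetD_zero (x :: t)]
      simp only [List.headD_cons, List.foldl_cons]
      have hfix : pvStepA (PySem.List.pyGetD x 0 0, x) x = (PySem.List.pyGetD x 0 0, x) := by
        simp [pvStepA]
      rw [hfix, pvK1_step]
    have hB : findMinimumPath_alt (x :: t) = pvScan t x := by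
      show PySem.List.pyGetD (PySem.List.sorted2 (x :: t) _ _) 0 [] = pvScan t x
      rw [pvGetD_zero]
      simp only [PySem.List.sorted2, if_neg (by decide : ¬ (false = true)), List.foldl_cons]
      rw [pv_insertBy_nil, pv_foldl_insertBy_headD]
      rfl
    rw [hA, hB]

-- ===== VERDICT (by name: the statement is the Claim_ definition above) =====
theorem findMinimumPath_spec : Claim_equal_findMinimumPath := by
  intro paths _ _
  unfold Spec_findMinimumPath
  exact pv_total_eq paths
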